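-- pv_equiv track=rewrite | github.com/fiddler-labs/fiddler-archive | imdb_rnn/cover_tokens.py | one_split
-- ===== SOURCE A (Python) =====
-- def one_split(in_strings: list,
--               split_string: str,
--               strip_whitespace: bool) -> list:
--     """Break each string in a list of strings into smaller parts.
--
--     Split after each occurrence of split_string.
--
--     :param in_strings: List of strings to be broken into substrings.
--     :param split_string: A separator string after which to divide.
--     :param strip_whitespace:(bool) leading/trailing whitespace from
--         tokens.
--     :return: A list of (probably) smaller strings.
--     """
--     out = []
--
--     include_delim = split_string.strip() if strip_whitespace else split_string
--
--     for sub_str in in_strings: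
--         splits = sub_str.split(split_string)
--         for piece in splits:
--             if strip_whitespace:
--                 piece = piece.strip()
--             if piece:
--                 out.append(piece)
--             if include_delim:
--                 out.append(split_string)
--         if include_delim:
--             out.pop()
--     return out
-- ===== SOURCE B (Python) =====
-- def one_split(in_strings: list,
--               split_string: str,
--               strip_whitespace: bool) -> list:
--     """Break each string in a list of strings into smaller parts.
--
--     Single pass per string with str.find: instead of splitting and
--     re-assembling with append/pop, walk each string by successive
--     occurrences of split_string, emitting the delimiter token between
--     consecutive pieces.
--     """
--     delim = split_string if (split_string.strip() if strip_whitespace else split_string) else None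
--     out = []
--     for s in in_strings:
--         start = 0
--         first = True
--         while True:
--             idx = s.find(split_string, start)
--             piece = s[start:idx] if idx >= 0 else s[start:]
--             if strip_whitespace:
--                 piece = piece.strip()
--             if not first and delim is not None:
--                 out.append(delim)
--             if piece:
--                 out.append(piece)
--             if idx < 0:
--                 break
--             start = idx + len(split_string)
--             first = False
--     return out
-- ===== Notes on version B (the rewrite author's own statement) =====
-- stated objective: alternative
-- what changed: Replaces split()-then-reassemble with append-after-every-piece plus a trailing pop by a single str.find cursor walk per string that emits the delimiter token only between consecutive pieces, never popping.
import Mathlib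
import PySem

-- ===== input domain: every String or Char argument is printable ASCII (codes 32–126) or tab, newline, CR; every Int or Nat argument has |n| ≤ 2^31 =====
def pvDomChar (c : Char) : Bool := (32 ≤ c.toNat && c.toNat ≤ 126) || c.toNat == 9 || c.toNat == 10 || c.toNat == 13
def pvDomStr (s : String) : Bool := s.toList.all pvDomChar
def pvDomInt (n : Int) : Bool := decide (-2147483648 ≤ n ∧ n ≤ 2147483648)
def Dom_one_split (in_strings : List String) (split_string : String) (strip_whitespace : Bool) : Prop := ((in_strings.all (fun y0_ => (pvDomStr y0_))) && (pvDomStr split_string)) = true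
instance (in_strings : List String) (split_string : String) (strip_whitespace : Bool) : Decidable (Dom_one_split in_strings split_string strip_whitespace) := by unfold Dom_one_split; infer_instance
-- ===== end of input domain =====

-- B replaces A's split()-then-reassemble (append a delimiter after every piece, pop the last)
-- by a single str.find cursor walk per string emitting the delimiter only between pieces; alternative, not faster.

-- ===== PORT A =====
-- Literal port of A.  Strings are handled on the List Char side (PySem.Chars), String.ofList back for output.
-- On split_string = "" Python's sub_str.split("") raises ValueError; that input is excluded by Pre_
-- (the 'none' branch of split? is unreachable under Pre_).
-- out.pop(): under Pre_, when include_delim is truthy, out is nonempty here (split returns at least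
-- one piece and split_string was appended after each), so Python's pop() removes exactly the last
-- element: List.dropLast is exact.
def one_split (in_strings : List String) (split_string : String) (strip_whitespace : Bool) : List String :=
  let include_delim : List Char :=
    if strip_whitespace then PySem.Chars.strip split_string.toList else split_string.toList
  in_strings.foldl (fun out sub_str =>
    match PySem.Chars.split? sub_str.toList split_string.toList with
    | none => out  -- unreachable under Pre_ (ValueError in Python)
    | some splits =>
      let out := splits.foldl (fun out piece =>
        let piece := if strip_whitespace then PySem.Chars.strip piece else piece
        let out := if piece = [] then out else out ++ [String.ofList piece]
        if include_delim = [] then out else out ++ [split_string]) out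
      if include_delim = [] then out else out.dropLast) []

-- ===== PORT B =====
-- B-side helper: the while-True cursor loop of Source B over one string; fuel bounds the iterations
-- (s.length + 1 suffices for split_string ≠ "", the domain Pre_ admits; fuel-exhaustion returns out).
def oneSplitAltGo (sep : List Char) (strip_whitespace : Bool) (delim : Option String)
    (s : List Char) : Nat → Nat → Bool → List String → List String
  | 0, _, _, out => out
  | fuel + 1, start, first, out =>
    let idx := PySem.Chars.findFrom s sep (start : Int) none
    let piece := if 0 ≤ idx then PySem.Chars.slice s (some (start : Int)) (some idx)
                 else PySem.Chars.slice s (some (start : Int)) none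
    let piece := if strip_whitespace then PySem.Chars.strip piece else piece
    let out := if first = false then
                 (match delim with
                  | some d => out ++ [d]
                  | none => out)
               else out
    let out := if piece = [] then out else out ++ [String.ofList piece]
    if idx < 0 then out
    else oneSplitAltGo sep strip_whitespace delim s fuel (idx.toNat + sep.length) false out

def one_split_alt (in_strings : List String) (split_string : String) (strip_whitespace : Bool) : List String :=
  let delim : Option String :=
    if (if strip_whitespace then PySem.Chars.strip split_string.toList else split_string.toList) = []
    then none else some split_string
  in_strings.foldl (fun out s =>
    oneSplitAltGo split_string.toList strip_whitespace delim s.toList (s.toList.length + 1) 0 true out) []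

-- ===== PRECONDITION & SPEC =====
-- Pre_ excludes exactly split_string = "", on which Python's A raises ValueError (str.split('')).
def Pre_one_split (in_strings : List String) (split_string : String) (strip_whitespace : Bool) : Prop :=
  split_string ≠ ""
instance (in_strings : List String) (split_string : String) (strip_whitespace : Bool) : Decidable (Pre_one_split in_strings split_string strip_whitespace) := by unfold Pre_one_split; infer_instance

def pvWitness_one_split : List String × String × Bool := (["a, b", " c ,"], ",", true)

def Spec_one_split (in_strings : List String) (split_string : String) (strip_whitespace : Bool) (out : List String) : Prop := out = one_split_alt in_strings split_string strip_whitespace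
instance (in_strings : List String) (split_string : String) (strip_whitespace : Bool) (out : List String) : Decidable (Spec_one_split in_strings split_string strip_whitespace out) := by unfold Spec_one_split; infer_instance

-- ===== CLAIM (what is proved, stated in full; the proofs are below) =====
def Claim_equal_one_split : Prop := ∀ (in_strings : List String) (split_string : String) (strip_whitespace : Bool), Dom_one_split in_strings split_string strip_whitespace → Pre_one_split in_strings split_string strip_whitespace → Spec_one_split in_strings split_string strip_whitespace (one_split in_strings split_string strip_whitespace)

-- ===== LEMMAS AND PROOFS =====

-- processed-piece contribution of one raw piece (proof-only helper)
def pvTok (sw : Bool) (p : List Char) : List String :=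
  let q := if sw then PySem.Chars.strip p else p
  if q = [] then [] else [String.ofList q]

def pvDl (delim : Option String) : List String :=
  match delim with
  | some d => [d]
  | none => []

-- the token stream both programs produce from the piece list of one input string
def pvInter (sw : Bool) (delim : Option String) : Bool → List (List Char) → List String
  | _, [] => []
  | first, p :: ps => (if first then [] else pvDl delim) ++ pvTok sw p ++ pvInter sw delim false ps

lemma pv_findGo_shift (sub : List Char) : ∀ (l : List Char) (k : Nat),
    PySem.Chars.find.go sub l k =
      if PySem.Chars.find l sub = -1 then -1 else PySem.Chars.find l sub + k := by
  intro l
  induction l with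
  | nil =>
    intro k
    by_cases h : sub.isEmpty = true <;>
      simp [PySem.Chars.find, PySem.Chars.find.go, h]
  | cons c t ih =>
    intro k
    have hstep : ∀ (m : Nat), PySem.Chars.find.go sub (c :: t) m =
        if sub.isPrefixOf (c :: t) = true then (m : Int)
        else PySem.Chars.find.go sub t (m + 1) := by
      intro m; simp [PySem.Chars.find.go]
    by_cases h : sub.isPrefixOf (c :: t) = true
    · simp [PySem.Chars.find, hstep, h]
    · rw [show PySem.Chars.find (c :: t) sub = PySem.Chars.find.go sub (c :: t) 0 from rfl,
        hstep k, hstep 0, if_neg h, if_neg h, ih (k + 1), ih 1]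
      have hneg : -1 ≤ PySem.Chars.find t sub := PySem.Chars.neg_one_le_find t sub
      by_cases h2 : PySem.Chars.find t sub = -1
      · simp [h2]
      · have h3 : ¬ (PySem.Chars.find t sub + ((1 : Nat) : Int) = -1) := by push_cast; omega
        simp only [if_neg h2, if_neg h3]
        push_cast
        omega

lemma pv_find_nil {sep : List Char} (h : sep ≠ []) : PySem.Chars.find [] sep = -1 := by
  have : sep.isEmpty = false := by simpa [List.isEmpty_iff] using h
  simp [PySem.Chars.find, PySem.Chars.find.go, this]

lemma pv_find_cons_pos {sep : List Char} {c : Char} {t : List Char}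
    (h : sep.isPrefixOf (c :: t) = true) : PySem.Chars.find (c :: t) sep = 0 := by
  simp [PySem.Chars.find, PySem.Chars.find.go, h]

lemma pv_find_cons_neg {sep : List Char} {c : Char} {t : List Char}
    (h : ¬ sep.isPrefixOf (c :: t) = true) :
    PySem.Chars.find (c :: t) sep =
      if PySem.Chars.find t sep = -1 then -1 else PySem.Chars.find t sep + 1 := by
  have hstep : PySem.Chars.find.go sep (c :: t) 0 =
      if sep.isPrefixOf (c :: t) = true then (0 : Int)
      else PySem.Chars.find.go sep t 1 := by
    simp [PySem.Chars.find.go]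
  have : PySem.Chars.find (c :: t) sep = PySem.Chars.find.go sep (c :: t) 0 := rfl
  rw [this, hstep, if_neg h, pv_findGo_shift sep t 1]
  rfl

lemma pv_splitOn_go {sep : List Char} (hsep : sep ≠ []) :
    ∀ (fuel : Nat) (l cur : List Char) (acc : List (List Char)), l.length < fuel →
      PySem.Chars.splitOn.go sep fuel l cur acc =
        acc.reverse ++
          (if PySem.Chars.find l sep = -1
           then [cur.reverse ++ l]
           else (cur.reverse ++ l.take (PySem.Chars.find l sep).toNat) ::
                PySem.Chars.splitOn
                  (l.drop ((PySem.Chars.find l sep).toNat + sep.length)) sep) := by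
  intro fuel
  induction fuel using Nat.strong_induction_on with
  | _ fuel ih =>
    intro l cur acc hlen
    match fuel, l with
    | 0, l => omega
    | fuel + 1, [] =>
      simp [PySem.Chars.splitOn.go, pv_find_nil hsep]
    | fuel + 1, c :: rest =>
      have hseplen : 1 ≤ sep.length := by
        cases sep with
        | nil => exact absurd rfl hsep
        | cons a b => simp
      by_cases h : sep.isPrefixOf (c :: rest) = true
      · have hfind := pv_find_cons_pos h
        have hdroplen : (List.drop sep.length (c :: rest)).length < fuel := by
          have h1 : (List.drop sep.length (c :: rest)).length =
              (c :: rest).length - sep.length := List.length_drop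
          have h2 : (c :: rest).length = rest.length + 1 := List.length_cons
          omega
        have hgo : PySem.Chars.splitOn.go sep (fuel + 1) (c :: rest) cur acc =
            PySem.Chars.splitOn.go sep fuel (List.drop sep.length (c :: rest)) []
              (cur.reverse :: acc) := by
          simp [PySem.Chars.splitOn.go, h]
        have hsplit : PySem.Chars.splitOn (List.drop sep.length (c :: rest)) sep =
            PySem.Chars.splitOn.go sep ((List.drop sep.length (c :: rest)).length + 1)
              (List.drop sep.length (c :: rest)) [] [] := rfl
        rw [hgo, ih fuel (by omega) _ [] _ hdroplen]
        simp only [hfind]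
        norm_num
        rw [hsplit, ih ((List.drop sep.length (c :: rest)).length + 1) (by omega) _ [] _
          (by omega)]
        by_cases h2 : PySem.Chars.find (List.drop sep.length (c :: rest)) sep = -1 <;>
          simp [h2]
      · have hfind := pv_find_cons_neg h
        have hgo : PySem.Chars.splitOn.go sep (fuel + 1) (c :: rest) cur acc =
            PySem.Chars.splitOn.go sep fuel rest (c :: cur) acc := by
          simp [PySem.Chars.splitOn.go, h]
        have hlen' : rest.length < fuel := by
          have h2 : (c :: rest).length = rest.length + 1 := List.length_cons
          omega
        rw [hgo, ih fuel (by omega) rest (c :: cur) acc hlen']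
        have hneg : -1 ≤ PySem.Chars.find rest sep := PySem.Chars.neg_one_le_find rest sep
        by_cases h2 : PySem.Chars.find rest sep = -1
        · simp [h2, hfind]
        · have h3 : ¬ (PySem.Chars.find rest sep + 1 = -1) := by omega
          simp only [hfind, h2, if_false, h3]
          have htn : (PySem.Chars.find rest sep + 1).toNat =
              (PySem.Chars.find rest sep).toNat + 1 := by omega
          simp only [htn]
          have hdd : List.drop ((PySem.Chars.find rest sep).toNat + 1 + sep.length) (c :: rest) =
              List.drop ((PySem.Chars.find rest sep).toNat + sep.length) rest := by
            rw [show (PySem.Chars.find rest sep).toNat + 1 + sep.length =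
              ((PySem.Chars.find rest sep).toNat + sep.length) + 1 by omega]
            exact List.drop_succ_cons
          simp [hdd, List.take_succ_cons]

lemma pv_splitOn_eq {sep : List Char} (hsep : sep ≠ []) (l : List Char) :
    PySem.Chars.splitOn l sep =
      if PySem.Chars.find l sep = -1
      then [l]
      else l.take (PySem.Chars.find l sep).toNat ::
           PySem.Chars.splitOn (l.drop ((PySem.Chars.find l sep).toNat + sep.length)) sep := by
  have h0 : PySem.Chars.splitOn l sep = PySem.Chars.splitOn.go sep (l.length + 1) l [] [] := rfl
  rw [h0, pv_splitOn_go hsep (l.length + 1) l [] [] (by omega)]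
  by_cases h : PySem.Chars.find l sep = -1 <;> simp [h]

lemma pv_splitOn_ne_nil {sep : List Char} (hsep : sep ≠ []) (l : List Char) :
    PySem.Chars.splitOn l sep ≠ [] := by
  rw [pv_splitOn_eq hsep l]
  by_cases h : PySem.Chars.find l sep = -1 <;> simp [h]

-- A's inner loop over the pieces of one string
lemma pv_A_inner (sw : Bool) (ss : String) (include_delim : List Char) :
    ∀ (splits : List (List Char)) (out : List String),
      splits.foldl (fun out piece =>
        let piece := if sw then PySem.Chars.strip piece else piece
        let out := if piece = [] then out else out ++ [String.ofList piece]
        if include_delim = [] then out else out ++ [ss]) out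
      = out ++ splits.flatMap (fun p => pvTok sw p ++ (if include_delim = [] then [] else [ss])) := by
  intro splits
  induction splits with
  | nil => intro out; simp
  | cons p ps ih =>
    intro out
    simp only [List.foldl_cons, List.flatMap_cons, ih]
    by_cases hd : include_delim = [] <;>
      by_cases hp : (if sw then PySem.Chars.strip p else p) = [] <;>
        simp [pvTok, hd, hp]

lemma pv_flat_ne_nil (sw : Bool) (ss : String) :
    ∀ (pieces : List (List Char)), pieces ≠ [] →
      pieces.flatMap (fun p => pvTok sw p ++ [ss]) ≠ [] := by
  intro pieces h
  cases pieces with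
  | nil => exact absurd rfl h
  | cons p ps =>
    simp only [List.flatMap_cons]
    intro hc
    rcases List.append_eq_nil_iff.mp hc with ⟨h1, _⟩
    rcases List.append_eq_nil_iff.mp h1 with ⟨_, h2⟩
    exact List.cons_ne_nil _ _ h2

lemma pv_flat_delim (sw : Bool) (ss : String) :
    ∀ (pieces : List (List Char)), pieces ≠ [] →
      (pieces.flatMap (fun p => pvTok sw p ++ [ss])).dropLast =
        pvInter sw (some ss) true pieces := by
  intro pieces
  induction pieces with
  | nil => intro h; exact absurd rfl h
  | cons p ps ih =>
    intro _
    cases ps with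
    | nil =>
      simp [pvInter, pvTok]
    | cons q qs =>
      have hne : (q :: qs : List (List Char)) ≠ [] := List.cons_ne_nil _ _
      have hflat := pv_flat_ne_nil sw ss (q :: qs) hne
      rw [List.flatMap_cons, List.dropLast_append_of_ne_nil hflat, ih hne]
      simp [pvInter, pvDl]

lemma pv_flat_nodelim (sw : Bool) :
    ∀ (pieces : List (List Char)) (first : Bool),
      pieces.flatMap (pvTok sw) = pvInter sw none first pieces := by
  intro pieces
  induction pieces with
  | nil => intro first; simp [pvInter]
  | cons p ps ih =>
    intro first
    cases first <;> simp [pvInter, pvDl, ih false]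

-- B's cursor loop produces the interleaved tokens of the pieces of the suffix s[start:]
lemma pv_altGo {sep : List Char} (hsep : sep ≠ []) (sw : Bool) (delim : Option String)
    (s : List Char) :
    ∀ (fuel start : Nat) (first : Bool) (out : List String),
      start ≤ s.length → s.length - start < fuel →
      oneSplitAltGo sep sw delim s fuel start first out =
        out ++ pvInter sw delim first (PySem.Chars.splitOn (s.drop start) sep) := by
  intro fuel
  induction fuel using Nat.strong_induction_on with
  | _ fuel ih =>
    intro start first out hstart hfuel
    match fuel with
    | 0 => omega
    | fuel + 1 =>
      have hseplen : 1 ≤ sep.length := by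
        cases sep with
        | nil => exact absurd rfl hsep
        | cons a b => simp
      have hff := PySem.Chars.findFrom_natCast s sep start hstart
      by_cases hcase : PySem.Chars.find (List.drop start s) sep = -1
      · have hidx : PySem.Chars.findFrom s sep (start : Int) none = -1 := by
          rw [hff, if_pos hcase]
        have hsplit2 : PySem.Chars.splitOn (List.drop start s) sep = [List.drop start s] := by
          rw [pv_splitOn_eq hsep]; simp [hcase]
        simp only [oneSplitAltGo, hidx]
        norm_num
        rw [hsplit2]
        cases first <;> cases delim <;>
          by_cases hp : (if sw = true then PySem.Chars.strip (List.drop start s)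
            else List.drop start s) = [] <;>
            simp [pvInter, pvTok, pvDl, hp]
      · have hneg := PySem.Chars.neg_one_le_find (List.drop start s) sep
        have h0f : 0 ≤ PySem.Chars.find (List.drop start s) sep := by omega
        have hidx : PySem.Chars.findFrom s sep (start : Int) none =
            (start : Int) + PySem.Chars.find (List.drop start s) sep := by
          rw [hff, if_neg hcase]
        have hfs := (PySem.Chars.find_spec (s := List.drop start s) (sub := sep) h0f).1
        have hfle : (PySem.Chars.find (List.drop start s) sep).toNat + sep.length ≤
            s.length - start := by
          have h1 := hfs.length_le
          have h2 : (List.drop (PySem.Chars.find (List.drop start s) sep).toNat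
              (List.drop start s)).length = (List.drop start s).length -
              (PySem.Chars.find (List.drop start s) sep).toNat := List.length_drop
          have h3 : (List.drop start s).length = s.length - start := List.length_drop
          omega
        have htn : ((start : Int) + PySem.Chars.find (List.drop start s) sep).toNat =
            start + (PySem.Chars.find (List.drop start s) sep).toNat := by omega
        have h0le : (0 : Int) ≤ (start : Int) + PySem.Chars.find (List.drop start s) sep := by
          omega
        have hnlt : ¬ ((start : Int) + PySem.Chars.find (List.drop start s) sep < 0) := by omega
        simp only [oneSplitAltGo, hidx, if_pos h0le, if_neg hnlt]
        rw [PySem.Chars.slice_eq_listSlice, PySem.List.slice_toNat s (by positivity) h0le]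
        simp only [htn, Int.toNat_natCast, Nat.add_sub_cancel_left]
        rw [ih fuel (by omega) (start + (PySem.Chars.find (List.drop start s) sep).toNat
          + sep.length) false _ (by omega) (by omega)]
        have hsplit := pv_splitOn_eq hsep (List.drop start s)
        rw [if_neg hcase] at hsplit
        rw [List.drop_drop] at hsplit
        rw [show start + ((PySem.Chars.find (List.drop start s) sep).toNat + sep.length) =
          start + (PySem.Chars.find (List.drop start s) sep).toNat + sep.length from by omega]
          at hsplit
        rw [hsplit]
        cases first <;> cases delim <;>
          by_cases hp : (if sw = true then
              PySem.Chars.strip (List.take (PySem.Chars.find (List.drop start s) sep).toNat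
                (List.drop start s))
            else List.take (PySem.Chars.find (List.drop start s) sep).toNat
              (List.drop start s)) = [] <;>
            simp [pvInter, pvTok, pvDl, hp]

lemma pv_main (ss : String) (sw : Bool) (hsep : ss.toList ≠ []) :
    ∀ (ins : List String) (out : List String),
      ins.foldl (fun out sub_str =>
        match PySem.Chars.split? sub_str.toList ss.toList with
        | none => out
        | some splits =>
          let out := splits.foldl (fun out piece =>
            let piece := if sw then PySem.Chars.strip piece else piece
            let out := if piece = [] then out else out ++ [String.ofList piece]
            if (if sw then PySem.Chars.strip ss.toList else ss.toList) = [] then out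
            else out ++ [ss]) out
          if (if sw then PySem.Chars.strip ss.toList else ss.toList) = [] then out
          else out.dropLast) out
      = ins.foldl (fun out s =>
          oneSplitAltGo ss.toList sw
            (if (if sw then PySem.Chars.strip ss.toList else ss.toList) = [] then none
             else some ss)
            s.toList (s.toList.length + 1) 0 true out) out := by
  intro ins
  induction ins with
  | nil => intro out; rfl
  | cons s rest ih =>
    intro out
    simp only [List.foldl_cons]
    rw [ih]
    congr 1
    have hEmpty : ss.toList.isEmpty = false := by simpa [List.isEmpty_iff] using hsep
    have hsplit? : PySem.Chars.split? s.toList ss.toList =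
        some (PySem.Chars.splitOn s.toList ss.toList) := by
      simp [PySem.Chars.split?, hEmpty]
    have hB := pv_altGo hsep sw
      (if (if sw then PySem.Chars.strip ss.toList else ss.toList) = [] then none else some ss)
      s.toList (s.toList.length + 1) 0 true out (by omega) (by omega)
    simp only [List.drop_zero] at hB
    rw [hB, hsplit?]
    simp only []
    rw [pv_A_inner sw ss (if sw then PySem.Chars.strip ss.toList else ss.toList)
      (PySem.Chars.splitOn s.toList ss.toList) out]
    by_cases hd : (if sw then PySem.Chars.strip ss.toList else ss.toList) = []
    · simp only [hd, if_true, List.append_nil]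
      rw [pv_flat_nodelim sw (PySem.Chars.splitOn s.toList ss.toList) true]
    · simp only [if_neg hd]
      have hne := pv_splitOn_ne_nil hsep s.toList
      have hflat := pv_flat_ne_nil sw ss _ hne
      rw [List.dropLast_append_of_ne_nil hflat, pv_flat_delim sw ss _ hne]

-- ===== VERDICT (by name: the statement is the Claim_ definition above) =====
theorem one_split_spec : Claim_equal_one_split := by
  unfold Claim_equal_one_split
  intro ins ss sw hdom hpre
  have hsep : ss.toList ≠ [] := by
    intro h
    apply hpre
    have := congrArg String.ofList h
    simpa using this
  unfold Spec_one_split one_split one_split_alt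
  exact pv_main ss sw hsep ins []
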